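-- pv_equiv track=rewrite | github.com/agniinvestor/LagnaMaster | src/calculations/dasha_scoring.py | _house_from_lord
-- ===== SOURCE A (Python) =====
-- def _house_from_lord(planet: str, lagna_si: int) -> list[int]:
--     """Houses ruled by a planet given Lagna."""
--     result = []
--     _SL = {
--         0: "Mars",
--         1: "Venus",
--         2: "Mercury",
--         3: "Moon",
--         4: "Sun",
--         5: "Mercury",
--         6: "Venus",
--         7: "Mars",
--         8: "Jupiter",
--         9: "Saturn",
--         10: "Saturn",
--         11: "Jupiter",
--     }
--     for h in range(1, 13):
--         si = (lagna_si + h - 1) % 12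
--         if _SL.get(si) == planet:
--             result.append(h)
--     return result
-- ===== SOURCE B (Python) =====
-- def _house_from_lord(planet: str, lagna_si: int) -> list[int]:
--     """Houses ruled by a planet given Lagna."""
--     _PLANET_SIGNS = {
--         "Mars": [0, 7],
--         "Venus": [1, 6],
--         "Mercury": [2, 5],
--         "Moon": [3],
--         "Sun": [4],
--         "Jupiter": [8, 11],
--         "Saturn": [9, 10],
--     }
--     return sorted((si - lagna_si) % 12 + 1 for si in _PLANET_SIGNS.get(planet, []))
-- ===== Notes on version B (the rewrite author's own statement) =====
-- stated objective: alternative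
-- what changed: Instead of scanning all 12 houses and checking each sign's lord against the planet, B uses a reverse lookup from planet to its ruled sign indices, maps each sign directly to its house number and sorts the (at most two) results.
import Mathlib
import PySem

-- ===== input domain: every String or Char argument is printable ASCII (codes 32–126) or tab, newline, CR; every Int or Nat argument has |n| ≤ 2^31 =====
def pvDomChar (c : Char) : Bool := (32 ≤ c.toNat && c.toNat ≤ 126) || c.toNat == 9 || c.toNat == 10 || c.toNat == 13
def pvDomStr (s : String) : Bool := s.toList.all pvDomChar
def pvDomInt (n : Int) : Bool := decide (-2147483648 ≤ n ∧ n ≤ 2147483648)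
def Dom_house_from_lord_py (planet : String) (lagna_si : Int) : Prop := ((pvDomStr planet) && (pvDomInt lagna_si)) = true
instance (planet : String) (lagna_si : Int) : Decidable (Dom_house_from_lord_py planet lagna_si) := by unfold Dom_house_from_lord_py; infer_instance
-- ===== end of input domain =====

-- B replaces A's scan of all 12 houses by a reverse lookup from the planet to its two
-- (or one) ruled sign indices, mapping each to its house and sorting (objective: alternative/idiomatic).

-- ===== PORT A =====
-- the literal _SL dict built inside A
def pvSL : PySem.Dict Int String := PySem.Dict.ofList
  [(0, "Mars"), (1, "Venus"), (2, "Mercury"), (3, "Moon"), (4, "Sun"), (5, "Mercury"),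
   (6, "Venus"), (7, "Mars"), (8, "Jupiter"), (9, "Saturn"), (10, "Saturn"), (11, "Jupiter")]

def house_from_lord_py (planet : String) (lagna_si : Int) : List Int :=
  (PySem.List.pyRange 1 13 1).foldl (fun result h =>
    let si := PySem.Int.mod (lagna_si + h - 1) 12
    if pvSL.get? si = some planet then result ++ [h] else result) []

-- ===== PORT B =====
-- the literal _PLANET_SIGNS reverse-lookup dict built inside B
def pvPlanetSigns : PySem.Dict String (List Int) := PySem.Dict.ofList
  [("Mars", [0, 7]), ("Venus", [1, 6]), ("Mercury", [2, 5]), ("Moon", [3]),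
   ("Sun", [4]), ("Jupiter", [8, 11]), ("Saturn", [9, 10])]

def house_from_lord_py_alt (planet : String) (lagna_si : Int) : List Int :=
  PySem.List.sorted ((pvPlanetSigns.getD planet []).map
    (fun si => PySem.Int.mod (si - lagna_si) 12 + 1)) (fun x => x) false

-- ===== PRECONDITION & SPEC =====
def Spec_house_from_lord_py (planet : String) (lagna_si : Int) (out : List Int) : Prop := out = house_from_lord_py_alt planet lagna_si
instance (planet : String) (lagna_si : Int) (out : List Int) : Decidable (Spec_house_from_lord_py planet lagna_si out) := by unfold Spec_house_from_lord_py; infer_instance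

-- ===== CLAIM (what is proved, stated in full; the proofs are below) =====
def Claim_equal_house_from_lord_py : Prop := ∀ (planet : String) (lagna_si : Int), Dom_house_from_lord_py planet lagna_si → Spec_house_from_lord_py planet lagna_si (house_from_lord_py planet lagna_si)

-- ===== LEMMAS AND PROOFS =====

-- both programs only depend on lagna_si modulo 12
lemma modShiftA (a h : Int) :
    PySem.Int.mod (a + h - 1) 12 = PySem.Int.mod (PySem.Int.mod a 12 + h - 1) 12 := by
  rw [PySem.Int.mod_eq_emod_of_pos (a := a + h - 1) (by norm_num),
      PySem.Int.mod_eq_emod_of_pos (a := a) (by norm_num),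
      PySem.Int.mod_eq_emod_of_pos (by norm_num)]
  omega

lemma modShiftB (si a : Int) :
    PySem.Int.mod (si - a) 12 = PySem.Int.mod (si - PySem.Int.mod a 12) 12 := by
  rw [PySem.Int.mod_eq_emod_of_pos (a := si - a) (by norm_num),
      PySem.Int.mod_eq_emod_of_pos (a := a) (by norm_num),
      PySem.Int.mod_eq_emod_of_pos (by norm_num)]
  omega

lemma A_mod (planet : String) (a : Int) :
    house_from_lord_py planet a = house_from_lord_py planet (PySem.Int.mod a 12) := by
  simp only [house_from_lord_py]
  apply PySem.List.foldl_congr_mem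
  intro acc h _
  rw [modShiftA]

lemma B_mod (planet : String) (a : Int) :
    house_from_lord_py_alt planet a = house_from_lord_py_alt planet (PySem.Int.mod a 12) := by
  simp only [house_from_lord_py_alt]
  congr 1
  refine List.map_congr_left ?_
  intro si _
  rw [modShiftB]

lemma main_lemma (planet : String) (r : Int) (h0 : 0 ≤ r) (h1 : r < 12) :
    house_from_lord_py planet r = house_from_lord_py_alt planet r := by
  by_cases hm : planet = "Mars"
  · subst hm; interval_cases r <;> decide
  by_cases hv : planet = "Venus"
  · subst hv; interval_cases r <;> decide
  by_cases hme : planet = "Mercury"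
  · subst hme; interval_cases r <;> decide
  by_cases hmo : planet = "Moon"
  · subst hmo; interval_cases r <;> decide
  by_cases hs : planet = "Sun"
  · subst hs; interval_cases r <;> decide
  by_cases hj : planet = "Jupiter"
  · subst hj; interval_cases r <;> decide
  by_cases hsa : planet = "Saturn"
  · subst hsa; interval_cases r <;> decide
  -- planet rules no sign: both sides are []
  have hps : pvPlanetSigns.getD planet [] = [] := by
    simp [PySem.Dict.getD, PySem.Dict.get?,
      show pvPlanetSigns.items = [("Mars", [0, 7]), ("Venus", [1, 6]), ("Mercury", [2, 5]),
        ("Moon", [3]), ("Sun", [4]), ("Jupiter", [8, 11]), ("Saturn", [9, 10])] from rfl,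
      List.find?, beq_eq_false_iff_ne.mpr (Ne.symm hm), beq_eq_false_iff_ne.mpr (Ne.symm hv),
      beq_eq_false_iff_ne.mpr (Ne.symm hme), beq_eq_false_iff_ne.mpr (Ne.symm hmo),
      beq_eq_false_iff_ne.mpr (Ne.symm hs), beq_eq_false_iff_ne.mpr (Ne.symm hj),
      beq_eq_false_iff_ne.mpr (Ne.symm hsa)]
  interval_cases r <;>
    simp [house_from_lord_py, house_from_lord_py_alt, hps, PySem.List.sorted,
      show PySem.List.pyRange 1 13 1 = [1,2,3,4,5,6,7,8,9,10,11,12] from rfl,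
      List.foldl, PySem.Int.mod, Int.fmod,
      show pvSL.get? 0 = some "Mars" from rfl, show pvSL.get? 1 = some "Venus" from rfl,
      show pvSL.get? 2 = some "Mercury" from rfl, show pvSL.get? 3 = some "Moon" from rfl,
      show pvSL.get? 4 = some "Sun" from rfl, show pvSL.get? 5 = some "Mercury" from rfl,
      show pvSL.get? 6 = some "Venus" from rfl, show pvSL.get? 7 = some "Mars" from rfl,
      show pvSL.get? 8 = some "Jupiter" from rfl, show pvSL.get? 9 = some "Saturn" from rfl,
      show pvSL.get? 10 = some "Saturn" from rfl, show pvSL.get? 11 = some "Jupiter" from rfl,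
      Ne.symm hm, Ne.symm hv, Ne.symm hme, Ne.symm hmo, Ne.symm hs, Ne.symm hj, Ne.symm hsa]

-- ===== VERDICT (by name: the statement is the Claim_ definition above) =====
theorem house_from_lord_py_spec : Claim_equal_house_from_lord_py := by
  intro planet lagna_si _
  unfold Spec_house_from_lord_py
  rw [A_mod, B_mod]
  exact main_lemma planet _ (PySem.Int.mod_nonneg _ (by norm_num))
    (PySem.Int.mod_lt _ (by norm_num))
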